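-- pv_equiv track=rewrite | github.com/galaxyh/ann-mt | corpus_processor.py | get_parallel_processed_sentences_batch_iter
-- ===== SOURCE A (Python) =====
-- def _get_parallel_batch(parallel_sentences, batch_size=1):
--     batch = []
--     for s_a, s_b in parallel_sentences:
--         batch.append((s_a, s_b))
--         if len(batch) == batch_size:
--             yield batch
--             batch = []
--     yield []
--
-- def get_parallel_processed_sentences_batch_iter(parallel_sentence_iter, batch_size=1):
--     for parallel_batch in _get_parallel_batch(parallel_sentence_iter, batch_size):
--         batch_a = []
--         batch_b = []
--         if parallel_batch:
--             for pb in parallel_batch: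
--                 batch_a.append(pb[0])
--                 batch_b.append(pb[1])
--         yield batch_a, batch_b
-- ===== SOURCE B (Python) =====
-- def get_parallel_processed_sentences_batch_iter(parallel_sentence_iter, batch_size=1):
--     pairs = list(parallel_sentence_iter)
--     while batch_size > 0 and len(pairs) >= batch_size:
--         chunk = pairs[:batch_size]
--         pairs = pairs[batch_size:]
--         yield [p[0] for p in chunk], [p[1] for p in chunk]
--     yield [], []
-- ===== Notes on version B (the rewrite author's own statement) =====
-- stated objective: simpler
-- what changed: Replaces the batching generator plus per-batch unzipping loop with a single while loop that slices fixed-size chunks off a materialized list and projects them with comprehensions; the per-element counter, intermediate list-of-tuples batches and helper generator disappear.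
import Mathlib
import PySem

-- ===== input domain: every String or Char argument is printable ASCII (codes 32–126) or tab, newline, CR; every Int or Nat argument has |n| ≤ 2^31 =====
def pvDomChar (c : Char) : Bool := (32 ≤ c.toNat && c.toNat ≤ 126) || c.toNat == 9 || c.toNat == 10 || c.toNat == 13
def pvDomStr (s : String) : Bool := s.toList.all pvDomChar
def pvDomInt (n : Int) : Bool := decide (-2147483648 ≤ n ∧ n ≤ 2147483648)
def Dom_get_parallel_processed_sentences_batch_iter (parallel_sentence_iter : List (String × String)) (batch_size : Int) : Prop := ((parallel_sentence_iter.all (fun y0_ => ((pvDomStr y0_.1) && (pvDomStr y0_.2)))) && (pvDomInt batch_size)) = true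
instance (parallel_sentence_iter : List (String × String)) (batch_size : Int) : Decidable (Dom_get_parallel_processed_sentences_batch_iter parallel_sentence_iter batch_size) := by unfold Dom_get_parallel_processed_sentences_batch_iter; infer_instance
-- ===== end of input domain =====

-- B replaces the per-element counting generator + unzip loop with one while loop slicing
-- fixed-size chunks off a materialized list (objective: simpler). Return value only: both
-- are generators in Python; neither mutates its argument.

-- ===== PORT A =====
-- _get_parallel_batch: yields the full batches in order, then a final []
def pvGetParallelBatch (parallel_sentences : List (String × String)) (batch_size : Int) : List (List (String × String)) :=
  (parallel_sentences.foldl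
    (fun (acc : List (List (String × String)) × List (String × String)) p =>
      let batch := acc.2 ++ [p]
      if (batch.length : Int) = batch_size then (acc.1 ++ [batch], []) else (acc.1, batch))
    ([], [])).1 ++ [[]]

def get_parallel_processed_sentences_batch_iter (parallel_sentence_iter : List (String × String)) (batch_size : Int) : List (List String × List String) :=
  (pvGetParallelBatch parallel_sentence_iter batch_size).map (fun parallel_batch =>
    if parallel_batch.isEmpty then (([] : List String), ([] : List String))
    else parallel_batch.foldl (fun acc pb => (acc.1 ++ [pb.1], acc.2 ++ [pb.2])) ([], []))

-- ===== PORT B =====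
-- the while loop of Source B: while batch_size > 0 and len(pairs) >= batch_size: slice off a chunk
def pvAltChunks (pairs : List (String × String)) (batch_size : Int) : List (List String × List String) :=
  if h : 0 < batch_size ∧ batch_size ≤ (pairs.length : Int) then
    (( PySem.List.slice pairs none (some batch_size)).map Prod.fst,
     ( PySem.List.slice pairs none (some batch_size)).map Prod.snd)
      :: pvAltChunks (PySem.List.slice pairs (some batch_size) none) batch_size
  else []
termination_by pairs.length
decreasing_by
  rw [PySem.List.slice_from pairs (le_of_lt h.1)]
  have h1 : 0 < batch_size.toNat := by omega
  have h2 : batch_size.toNat ≤ pairs.length := by omega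
  simp [List.length_drop]; omega

def get_parallel_processed_sentences_batch_iter_alt (parallel_sentence_iter : List (String × String)) (batch_size : Int) : List (List String × List String) :=
  pvAltChunks parallel_sentence_iter batch_size ++ [([], [])]

-- ===== PRECONDITION & SPEC =====
def Spec_get_parallel_processed_sentences_batch_iter (parallel_sentence_iter : List (String × String)) (batch_size : Int) (out : List (List String × List String)) : Prop := out = get_parallel_processed_sentences_batch_iter_alt parallel_sentence_iter batch_size
instance (parallel_sentence_iter : List (String × String)) (batch_size : Int) (out : List (List String × List String)) : Decidable (Spec_get_parallel_processed_sentences_batch_iter parallel_sentence_iter batch_size out) := by unfold Spec_get_parallel_processed_sentences_batch_iter; infer_instance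

-- ===== CLAIM (what is proved, stated in full; the proofs are below) =====
def Claim_equal_get_parallel_processed_sentences_batch_iter : Prop := ∀ (parallel_sentence_iter : List (String × String)) (batch_size : Int), Dom_get_parallel_processed_sentences_batch_iter parallel_sentence_iter batch_size → Spec_get_parallel_processed_sentences_batch_iter parallel_sentence_iter batch_size (get_parallel_processed_sentences_batch_iter parallel_sentence_iter batch_size)

-- ===== LEMMAS AND PROOFS =====

-- A's inner unzip fold appends the two projections
theorem pvFoldPair (pb : List (String × String)) (a b : List String) :
    pb.foldl (fun acc p => (acc.1 ++ [p.1], acc.2 ++ [p.2])) (a, b)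
      = (a ++ pb.map Prod.fst, b ++ pb.map Prod.snd) := by
  induction pb generalizing a b with
  | nil => simp
  | cons p t ih => simp [List.foldl, ih]

-- A's per-batch body is the projection pair
theorem pvProjEq (pb : List (String × String)) :
    (if pb.isEmpty then (([] : List String), ([] : List String))
     else pb.foldl (fun acc p => (acc.1 ++ [p.1], acc.2 ++ [p.2])) ([], []))
      = (pb.map Prod.fst, pb.map Prod.snd) := by
  cases pb with
  | nil => simp
  | cons p t => simp [pvFoldPair]

-- with batch_size ≤ 0 the counter condition never fires: no full batch is ever emitted
theorem pvFoldNonpos (bs : Int) (hbs : bs ≤ 0) (ps : List (String × String))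
    (out : List (List (String × String))) (batch : List (String × String)) :
    (ps.foldl
      (fun (acc : List (List (String × String)) × List (String × String)) p =>
        let b := acc.2 ++ [p]
        if (b.length : Int) = bs then (acc.1 ++ [b], []) else (acc.1, b))
      (out, batch)).1 = out := by
  induction ps generalizing batch with
  | nil => rfl
  | cons p t ih =>
      have hne : ¬ (((batch ++ [p]).length : Int) = bs) := by
        simp [List.length_append]; omega
      simp only [List.foldl, hne, reduceIte]
      exact ih (batch ++ [p])

-- main invariant: A's counting fold, projected, equals B's chunk slicing on the pending batch ++ rest
theorem pvFoldAlt (bs : Int) (hbs : 0 < bs) (ps : List (String × String)) :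
    ∀ (batch : List (String × String)) (out : List (List (String × String))),
      (batch.length : Int) < bs →
      ((ps.foldl
        (fun (acc : List (List (String × String)) × List (String × String)) p =>
          let b := acc.2 ++ [p]
          if (b.length : Int) = bs then (acc.1 ++ [b], []) else (acc.1, b))
        (out, batch)).1).map (fun pb => (pb.map Prod.fst, pb.map Prod.snd))
        = out.map (fun pb => (pb.map Prod.fst, pb.map Prod.snd)) ++ pvAltChunks (batch ++ ps) bs := by
  induction ps with
  | nil =>
      intro batch out h
      rw [pvAltChunks.eq_def]
      rw [dif_neg (by push_neg; intro _; simpa using h)]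
      simp
  | cons p t ih =>
      intro batch out h
      by_cases hc : (((batch ++ [p]).length : Int) = bs)
      · simp only [List.foldl, hc, if_pos]
        rw [ih [] (out ++ [batch ++ [p]]) (by simpa using hbs)]
        have hlen : bs ≤ ((batch ++ p :: t).length : Int) := by
          simp [List.length_append] at hc ⊢; omega
        have hb : (batch ++ [p]).length = bs.toNat := by
          simp [List.length_append] at hc ⊢; omega
        have hstep : pvAltChunks (batch ++ p :: t) bs
            = ((batch ++ [p]).map Prod.fst, (batch ++ [p]).map Prod.snd) :: pvAltChunks t bs := by
          rw [pvAltChunks.eq_def, dif_pos ⟨hbs, hlen⟩]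
          rw [PySem.List.slice_to (batch ++ p :: t) (le_of_lt hbs),
              PySem.List.slice_from (batch ++ p :: t) (le_of_lt hbs)]
          rw [show batch ++ p :: t = (batch ++ [p]) ++ t by simp,
              List.take_left' hb, List.drop_left' hb]
        rw [hstep]
        simp
      · simp only [List.foldl, hc, reduceIte]
        have h' : (((batch ++ [p]).length : Int)) < bs := by
          simp [List.length_append] at hc ⊢; omega
        rw [ih (batch ++ [p]) out h']
        simp

-- ===== VERDICT (by name: the statement is the Claim_ definition above) =====
theorem get_parallel_processed_sentences_batch_iter_spec : Claim_equal_get_parallel_processed_sentences_batch_iter := by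
  intro ps bs _dom
  unfold Spec_get_parallel_processed_sentences_batch_iter
  unfold get_parallel_processed_sentences_batch_iter get_parallel_processed_sentences_batch_iter_alt pvGetParallelBatch
  by_cases hbs : 0 < bs
  · simp only [List.map_append, List.map_cons, List.map_nil, List.isEmpty_nil, if_pos]
    simp only [pvProjEq]
    rw [pvFoldAlt bs hbs ps [] [] (by simpa using hbs)]
    simp
  · rw [pvFoldNonpos bs (by omega) ps [] []]
    rw [pvAltChunks.eq_def, dif_neg (by push_neg; intro h; omega)]
    simp
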